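-- pv_equiv track=rewrite | github.com/entozhevlad/algorithms | contests/contest2/H.py | calculate
-- ===== SOURCE A (Python) =====
-- def calculate(numbers):
--     st = []
--     prefix_sum = [0] * (len(numbers) + 1)
--     result = 0
--
--     for i in range(len(numbers)):
--         prefix_sum[i + 1] = prefix_sum[i] + numbers[i]
--
--     i = 0
--     while i <= len(numbers):
--         while st and (i == len(numbers) or numbers[st[-1]] > numbers[i]):
--             last_element = st.pop()
--             result = max(result, (prefix_sum[i] - prefix_sum[0 if not st else st[-1] + 1]) * numbers[last_element])
--         st.append(i)
--         i += 1
--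
--     return result
-- ===== SOURCE B (Python) =====
-- def calculate(numbers):
--     n = len(numbers)
--     prefix = [0] * (n + 1)
--     for i in range(n):
--         prefix[i + 1] = prefix[i] + numbers[i]
--     best = 0
--     for j in range(n):
--         lo = j
--         while lo > 0 and numbers[lo - 1] > numbers[j]:
--             lo -= 1
--         hi = j + 1
--         while hi < n and numbers[hi] >= numbers[j]:
--             hi += 1
--         best = max(best, (prefix[hi] - prefix[lo]) * numbers[j])
--     return best
-- ===== Notes on version B (the rewrite author's own statement) =====
-- stated objective: alternative
-- what changed: Replaces the interleaved monotonic-stack pop-and-aggregate loop by a stackless per-index formulation: for each index j two direct while-scans find the boundaries (nearest left index with value <= numbers[j], nearest right index with value < numbers[j]) and one aggregation computes max(best, (prefix[hi]-prefix[lo])*numbers[j]).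
import Mathlib
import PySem

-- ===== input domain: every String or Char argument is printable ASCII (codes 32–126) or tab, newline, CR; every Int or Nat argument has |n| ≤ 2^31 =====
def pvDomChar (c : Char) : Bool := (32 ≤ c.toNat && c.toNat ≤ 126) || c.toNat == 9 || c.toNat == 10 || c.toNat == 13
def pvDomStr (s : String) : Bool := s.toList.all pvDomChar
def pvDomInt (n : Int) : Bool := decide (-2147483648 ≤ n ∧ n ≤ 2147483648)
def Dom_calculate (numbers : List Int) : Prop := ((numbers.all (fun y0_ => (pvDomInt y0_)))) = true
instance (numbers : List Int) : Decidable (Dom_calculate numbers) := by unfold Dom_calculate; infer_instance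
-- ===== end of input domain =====

-- B replaces A's single interleaved monotonic-stack loop by per-index boundary while-scans plus
-- a separate aggregation pass (alternative decomposition, no stack); return values agree everywhere.

-- ===== PORT A =====
-- shared by both ports: both Pythons build the same prefix-sum array with the same loop
def pvPrefix (numbers : List Int) : List Int :=
  (List.range numbers.length).foldl
    (fun ps i => ps.set (i + 1) (ps.getD i 0 + numbers.getD i 0))
    (List.replicate (numbers.length + 1) 0)

-- Python's `0 if not st else st[-1] + 1` applied to the stack after the pop
def pvLeft (rest : List Nat) : Nat :=
  match rest with
  | [] => 0
  | k :: _ => k + 1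

-- A's inner `while st and (i == len(numbers) or numbers[st[-1]] > numbers[i])` loop;
-- the stack is represented with its top (Python st[-1]) at the HEAD of the list.
def pvPop (numbers ps : List Int) (i : Nat) : List Nat → Int → List Nat × Int
  | [], r => ([], r)
  | j :: rest, r =>
    if i = numbers.length ∨ numbers.getD i 0 < numbers.getD j 0 then
      pvPop numbers ps i rest
        (max r ((ps.getD i 0 - ps.getD (pvLeft rest) 0) * numbers.getD j 0))
    else (j :: rest, r)

def calculate (numbers : List Int) : Int :=
  ((List.range (numbers.length + 1)).foldl
    (fun s i =>
      let t := pvPop numbers (pvPrefix numbers) i s.1 s.2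
      (i :: t.1, t.2))
    (([] : List Nat), (0 : Int))).2

-- ===== PORT B =====
-- B's `while lo > 0 and numbers[lo - 1] > numbers[j]: lo -= 1`
def pvLo (numbers : List Int) (j : Nat) : Nat → Nat
  | 0 => 0
  | lo + 1 => if numbers.getD j 0 < numbers.getD lo 0 then pvLo numbers j lo else lo + 1

-- B's `while hi < n and numbers[hi] >= numbers[j]: hi += 1`
def pvHi (numbers : List Int) (j : Nat) (hi : Nat) : Nat :=
  if h : hi < numbers.length then
    if numbers.getD j 0 ≤ numbers.getD hi 0 then pvHi numbers j (hi + 1) else hi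
  else hi
termination_by numbers.length - hi

def calculate_alt (numbers : List Int) : Int :=
  (List.range numbers.length).foldl
    (fun best j =>
      max best (((pvPrefix numbers).getD (pvHi numbers j (j + 1)) 0 -
        (pvPrefix numbers).getD (pvLo numbers j j) 0) * numbers.getD j 0))
    0

-- ===== PRECONDITION & SPEC =====
def Spec_calculate (numbers : List Int) (out : Int) : Prop := out = calculate_alt numbers
instance (numbers : List Int) (out : Int) : Decidable (Spec_calculate numbers out) := by unfold Spec_calculate; infer_instance

-- ===== CLAIM (what is proved, stated in full; the proofs are below) =====
def Claim_equal_calculate : Prop := ∀ (numbers : List Int), Dom_calculate numbers → Spec_calculate numbers (calculate numbers)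

-- ===== LEMMAS AND PROOFS =====

-- `keepB numbers i j`: index j would still be on A's stack at the start of step i
def keepB (numbers : List Int) (i j : Nat) : Bool :=
  decide (∀ k < i, j < k → numbers.getD j 0 ≤ numbers.getD k 0)

-- A's stack contents at the start of step i, bottom first (Python's st[-1] is the last element)
def stk (numbers : List Int) (i : Nat) : List Nat :=
  (List.range i).filter (fun j => keepB numbers i j)

-- A's pop condition at step i
def popC (numbers : List Int) (i j : Nat) : Bool :=
  decide (i = numbers.length ∨ numbers.getD i 0 < numbers.getD j 0)

def leftOf (l : List Nat) : Nat :=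
  match l.getLast? with
  | none => 0
  | some k => k + 1

-- B's candidate value for index j
def candB (numbers ps : List Int) (j : Nat) : Int :=
  (ps.getD (pvHi numbers j (j + 1)) 0 - ps.getD (pvLo numbers j j) 0) * numbers.getD j 0

def mstep (numbers ps : List Int) (r : Int) (j : Nat) : Int :=
  max r (candB numbers ps j)

lemma keepB_iff (numbers : List Int) (i j : Nat) :
    keepB numbers i j = true ↔ ∀ k < i, j < k → numbers.getD j 0 ≤ numbers.getD k 0 := by
  simp [keepB]

lemma popC_iff (numbers : List Int) (i j : Nat) :
    popC numbers i j = true ↔ (i = numbers.length ∨ numbers.getD i 0 < numbers.getD j 0) := by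
  simp [popC]

lemma mem_stk (numbers : List Int) (i j : Nat) :
    j ∈ stk numbers i ↔ j < i ∧ keepB numbers i j = true := by
  simp [stk, List.mem_filter, List.mem_range]

lemma stk_sorted (numbers : List Int) (i : Nat) : (stk numbers i).Pairwise (· < ·) :=
  List.Pairwise.sublist List.filter_sublist List.pairwise_lt_range

lemma stk_nodup (numbers : List Int) (i : Nat) : (stk numbers i).Nodup :=
  (List.nodup_range).filter _

lemma stk_mono (numbers : List Int) (i m j : Nat)
    (hm : m ∈ stk numbers i) (hj : j ∈ stk numbers i) (hmj : m ≤ j) :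
    numbers.getD m 0 ≤ numbers.getD j 0 := by
  rcases Nat.eq_or_lt_of_le hmj with h | h
  · subst h; exact le_rfl
  · obtain ⟨hji, _⟩ := (mem_stk numbers i j).1 hj
    obtain ⟨_, hmk⟩ := (mem_stk numbers i m).1 hm
    exact ((keepB_iff numbers i m).1 hmk) j hji h

lemma left_match (l : List Nat) : pvLeft l.reverse = leftOf l := by
  rw [leftOf, ← List.head?_reverse]
  cases l.reverse <;> rfl

-- uniqueness characterization of B's right-boundary scan
lemma pvHi_eq (numbers : List Int) (j t : Nat) (htn : t ≤ numbers.length)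
    (hlast : t < numbers.length → numbers.getD t 0 < numbers.getD j 0) :
    ∀ d h, h ≤ t → t - h = d →
      (∀ k, h ≤ k → k < t → numbers.getD j 0 ≤ numbers.getD k 0) →
      pvHi numbers j h = t := by
  intro d
  induction d with
  | zero =>
    intro h hht hd _
    have ht : h = t := by omega
    subst ht
    unfold pvHi
    split
    · next hlt => rw [if_neg (not_le.mpr (hlast hlt))]
    · rfl
  | succ d ih =>
    intro h hht hd hmid
    have hlt : h < t := by omega
    have hn : h < numbers.length := lt_of_lt_of_le hlt htn
    unfold pvHi
    rw [dif_pos hn, if_pos (hmid h le_rfl hlt)]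
    exact ih (h + 1) (by omega) (by omega) (fun k hk1 hk2 => hmid k (by omega) hk2)

-- uniqueness characterization of B's left-boundary scan
lemma pvLo_eq (numbers : List Int) (j t : Nat)
    (hbelow : t = 0 ∨ (0 < t ∧ numbers.getD (t - 1) 0 ≤ numbers.getD j 0))
    (hmid : ∀ k, t ≤ k → k < j → numbers.getD j 0 < numbers.getD k 0) :
    ∀ d lo, lo ≤ j → lo = t + d → pvLo numbers j lo = t := by
  intro d
  induction d with
  | zero =>
    intro lo _ hlo
    rcases hbelow with h0 | ⟨hpos, hle⟩
    · subst h0; simp at hlo; subst hlo; rfl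
    · obtain ⟨s, hs⟩ : ∃ s, t = s + 1 := ⟨t - 1, by omega⟩
      have hlo' : lo = s + 1 := by omega
      subst hlo'
      have : numbers.getD s 0 ≤ numbers.getD j 0 := by
        have : t - 1 = s := by omega
        rwa [this] at hle
      simp only [pvLo, if_neg (not_lt.mpr this)]
      omega
  | succ d ih =>
    intro lo hloj hlo
    have hlo' : lo = (t + d) + 1 := by omega
    subst hlo'
    have hs : t + d < j := by omega
    have := hmid (t + d) (by omega) hs
    simp only [pvLo, if_pos this]
    exact ih (t + d) (by omega) rfl

-- if no surviving index lies in [lb, j), every value there is strictly above numbers[j]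
lemma nomid (numbers : List Int) (i j lb : Nat) (hji : j < i)
    (hkeep : keepB numbers i j = true)
    (hnot : ∀ k, lb ≤ k → k < j → keepB numbers i k = false) :
    ∀ k, lb ≤ k → k < j → numbers.getD j 0 < numbers.getD k 0 := by
  have hj := (keepB_iff numbers i j).1 hkeep
  have H : ∀ d k, j - k ≤ d → lb ≤ k → k < j → numbers.getD j 0 < numbers.getD k 0 := by
    intro d
    induction d with
    | zero => intro k h1 _ h3; omega
    | succ d ih =>
      intro k h1 h2 h3
      by_contra hcon
      push_neg at hcon
      have hk : keepB numbers i k = true := by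
        rw [keepB_iff]
        intro t hti hkt
        rcases lt_trichotomy t j with h' | h' | h'
        · exact le_of_lt (lt_of_le_of_lt hcon (ih t (by omega) (by omega) h'))
        · subst h'; exact hcon
        · exact le_trans hcon (hj t hti h')
      have := hnot k h2 h3
      rw [hk] at this
      exact absurd this (by simp)
  exact fun k => H j k (by omega)

-- the value A aggregates when popping j equals B's candidate for j
lemma cand_eq (numbers ps : List Int) (i : Nat) (hin : i ≤ numbers.length)
    (pre' : List Nat) (j : Nat)
    (hpref : (pre' ++ [j]) <+: stk numbers i)
    (hc : popC numbers i j = true) :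
    (ps.getD i 0 - ps.getD (leftOf pre') 0) * numbers.getD j 0 = candB numbers ps j := by
  obtain ⟨rest, heq⟩ := hpref
  have hsort : (stk numbers i).Pairwise (· < ·) := stk_sorted numbers i
  have hsort' : (pre' ++ [j] ++ rest).Pairwise (· < ·) := by rwa [heq]
  have hjmem : j ∈ stk numbers i := by rw [← heq]; simp
  obtain ⟨hji, hjkeep⟩ := (mem_stk numbers i j).1 hjmem
  have hjk := (keepB_iff numbers i j).1 hjkeep
  -- every surviving index below j lies in pre'
  have hbelow : ∀ k, k ∈ stk numbers i → k < j → k ∈ pre' := by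
    intro k hk hkj
    rw [← heq] at hk
    rcases List.mem_append.1 hk with hk' | hk'
    · rcases List.mem_append.1 hk' with h | h
      · exact h
      · simp at h; omega
    · have : j < k := by
        have := (List.pairwise_append.1 hsort').2.2
        exact this j (by simp) k hk'
      omega
  have hpre'mem : ∀ x ∈ pre', x ∈ stk numbers i ∧ x < j := by
    intro x hx
    constructor
    · rw [← heq]; simp [hx]
    · have := (List.pairwise_append.1 (List.pairwise_append.1 hsort').1).2.2
      exact this x hx j (by simp)
  -- right boundary
  have hhi : pvHi numbers j (j + 1) = i := by
    refine pvHi_eq numbers j i hin ?_ (i - (j + 1)) (j + 1) (by omega) rfl ?_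
    · intro hilt
      rcases (popC_iff numbers i j).1 hc with h | h
      · omega
      · exact h
    · intro k hk1 hk2
      exact hjk k hk2 (by omega)
  -- left boundary
  have hlo : pvLo numbers j j = leftOf pre' := by
    cases hl : pre'.getLast? with
    | none =>
      have hnil : pre' = [] := List.getLast?_eq_none_iff.1 hl
      have hnot : ∀ k, 0 ≤ k → k < j → keepB numbers i k = false := by
        intro k _ hkj
        by_contra hkk
        have hkk' : keepB numbers i k = true := by
          cases h : keepB numbers i k
          · exact absurd h hkk
          · rfl
        have : k ∈ pre' := hbelow k ((mem_stk numbers i k).2 ⟨by omega, hkk'⟩) hkj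
        rw [hnil] at this; simp at this
      have := nomid numbers i j 0 hji hjkeep hnot
      have h0 : leftOf pre' = 0 := by rw [leftOf, hl]
      rw [h0]
      exact pvLo_eq numbers j 0 (Or.inl rfl) (fun k _ hk => this k (by omega) hk) j j le_rfl (by omega)
    | some m =>
      have hmmem : m ∈ pre' := by
        obtain ⟨q, hq⟩ := List.getLast?_eq_some_iff.1 hl
        rw [hq]; simp
      obtain ⟨hmstk, hmj⟩ := hpre'mem m hmmem
      have hmax : ∀ x ∈ pre', x ≤ m := by
        obtain ⟨q, hq⟩ := List.getLast?_eq_some_iff.1 hl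
        intro x hx
        have hp : pre'.Pairwise (· < ·) :=
          (List.pairwise_append.1 (List.pairwise_append.1 hsort').1).1
        rw [hq] at hp hx
        rcases List.mem_append.1 hx with h | h
        · exact le_of_lt ((List.pairwise_append.1 hp).2.2 x h m (by simp))
        · simp at h; omega
      have hnot : ∀ k, m + 1 ≤ k → k < j → keepB numbers i k = false := by
        intro k hk1 hkj
        by_contra hkk
        have hkk' : keepB numbers i k = true := by
          cases h : keepB numbers i k
          · exact absurd h hkk
          · rfl
        have : k ∈ pre' := hbelow k ((mem_stk numbers i k).2 ⟨by omega, hkk'⟩) hkj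
        have := hmax k this
        omega
      have hmid := nomid numbers i j (m + 1) hji hjkeep hnot
      have hval : numbers.getD m 0 ≤ numbers.getD j 0 := stk_mono numbers i m j hmstk hjmem (le_of_lt hmj)
      have h1 : leftOf pre' = m + 1 := by rw [leftOf, hl]
      rw [h1]
      refine pvLo_eq numbers j (m + 1) (Or.inr ⟨by omega, by simpa using hval⟩)
        (fun k hk1 hk2 => hmid k hk1 hk2) (j - (m + 1)) j le_rfl (by omega)
  rw [candB, hhi, hlo]

-- running A's pop loop over a popped suffix accumulates B's candidates
lemma pop_run (numbers ps : List Int) (i : Nat) (hin : i ≤ numbers.length) :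
    ∀ (post pre : List Nat) (r : Int), (pre ++ post) <+: stk numbers i →
      (∀ j ∈ post, popC numbers i j = true) →
      pvPop numbers ps i (pre ++ post).reverse r
        = pvPop numbers ps i pre.reverse (post.reverse.foldl (mstep numbers ps) r) := by
  intro post
  induction post using List.reverseRecOn with
  | nil => intro pre r _ _; simp
  | append_singleton q j ih =>
    intro pre r hpref hall
    have hcj : popC numbers i j = true := hall j (by simp)
    have hcond : i = numbers.length ∨ numbers.getD i 0 < numbers.getD j 0 :=
      (popC_iff numbers i j).1 hcj
    have hrev : (pre ++ (q ++ [j])).reverse = j :: (pre ++ q).reverse := by simp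
    rw [hrev]
    rw [pvPop, if_pos hcond]
    have hpref' : ((pre ++ q) ++ [j]) <+: stk numbers i := by
      rwa [List.append_assoc]
    have hval := cand_eq numbers ps i hin (pre ++ q) j hpref' hcj
    rw [left_match (pre ++ q), hval]
    have hpref2 : (pre ++ q) <+: stk numbers i :=
      ((pre ++ q).prefix_append [j]).trans hpref'
    rw [ih pre _ hpref2 (fun x hx => hall x (by simp [hx]))]
    congr 1
    simp [mstep]

-- the pop loop stops on a stack whose elements all fail the pop condition
lemma pop_stop (numbers ps : List Int) (i : Nat) :
    ∀ (pre : List Nat) (r : Int), (∀ j ∈ pre, popC numbers i j = false) →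
      pvPop numbers ps i pre.reverse r = (pre.reverse, r) := by
  intro pre r h
  cases hrev : pre.reverse with
  | nil => simp [pvPop]
  | cons j t =>
    have hj : j ∈ pre := by
      have : j ∈ pre.reverse := by rw [hrev]; simp
      simpa using this
    have hc := h j hj
    have : ¬ (i = numbers.length ∨ numbers.getD i 0 < numbers.getD j 0) := by
      intro hcc
      rw [(popC_iff numbers i j).2 hcc] at hc
      exact absurd hc (by simp)
    rw [pvPop, if_neg this]

-- keepB at the next step, below the current index
lemma keep_succ (numbers : List Int) (i j : Nat) (hj : j < i) (hi : i < numbers.length) :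
    keepB numbers (i + 1) j = (keepB numbers i j && ! popC numbers i j) := by
  by_cases h : keepB numbers (i + 1) j = true
  · have h' := (keepB_iff numbers (i + 1) j).1 h
    have h1 : keepB numbers i j = true :=
      (keepB_iff numbers i j).2 (fun k hk hjk => h' k (by omega) hjk)
    have h2 : popC numbers i j = false := by
      have : ¬ (i = numbers.length ∨ numbers.getD i 0 < numbers.getD j 0) := by
        rintro (hh | hh)
        · omega
        · exact absurd hh (not_lt.mpr (h' i (by omega) hj))
      cases hp : popC numbers i j
      · rfl
      · exact absurd ((popC_iff numbers i j).1 hp) this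
    rw [h, h1, h2]; rfl
  · have h0 : keepB numbers (i + 1) j = false := by
      cases hh : keepB numbers (i + 1) j
      · rfl
      · exact absurd hh h
    rw [h0]
    rw [keepB_iff] at h
    push_neg at h
    obtain ⟨k, hki, hjk, hval⟩ := h
    by_cases hk : k = i
    · have hp : popC numbers i j = true := (popC_iff numbers i j).2 (Or.inr (hk ▸ hval))
      rw [hp]; simp
    · have h1 : keepB numbers i j = false := by
        cases hh : keepB numbers i j
        · rfl
        · exact absurd ((keepB_iff numbers i j).1 hh k (by omega) hjk) (by omega)
      rw [h1]; rfl

lemma dropWhile_head_false (p : Nat → Bool) :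
    ∀ (l : List Nat) (h : Nat) (t : List Nat), l.dropWhile p = h :: t → p h = false := by
  intro l
  induction l with
  | nil => intro h t hd; simp at hd
  | cons a l ih =>
    intro h t hd
    by_cases hp : p a = true
    · rw [List.dropWhile_cons_of_pos hp] at hd
      exact ih h t hd
    · rw [List.dropWhile_cons_of_neg hp] at hd
      cases hd
      exact Bool.eq_false_iff.2 hp

-- main invariant for A's outer loop, at the start of step i (i ≤ n)
lemma outer_inv (numbers : List Int) :
    ∀ i, i ≤ numbers.length →
      ∃ P : List Nat,
        P.Perm ((List.range i).filter (fun j => ! keepB numbers i j)) ∧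
        (List.range i).foldl
          (fun s k =>
            let t := pvPop numbers (pvPrefix numbers) k s.1 s.2
            (k :: t.1, t.2))
          (([] : List Nat), (0 : Int))
          = ((stk numbers i).reverse, P.foldl (mstep numbers (pvPrefix numbers)) 0) := by
  intro i
  induction i with
  | zero => exact fun _ => ⟨[], by simp, by simp [stk]⟩
  | succ i ih =>
    intro hle
    have hi_lt : i < numbers.length := by omega
    obtain ⟨P, hP, hfold⟩ := ih (by omega)
    have hPmem : ∀ x, x ∈ P ↔ (x < i ∧ keepB numbers i x = false) := by
      intro x
      rw [hP.mem_iff, List.mem_filter, List.mem_range]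
      simp
    -- split the stack at the pop boundary
    set u := (stk numbers i).reverse with hu
    set pre := (u.dropWhile (popC numbers i)).reverse with hpre
    set post := (u.takeWhile (popC numbers i)).reverse with hpost
    have hsplit : pre ++ post = stk numbers i := by
      rw [hpre, hpost, ← List.reverse_append, List.takeWhile_append_dropWhile, hu,
        List.reverse_reverse]
    have hpostc : ∀ j ∈ post, popC numbers i j = true := by
      intro j hj
      exact List.mem_takeWhile_imp (by simpa [hpost] using hj)
    have hprec : ∀ j ∈ pre, popC numbers i j = false := by
      intro j hj
      have hjd : j ∈ u.dropWhile (popC numbers i) := by simpa [hpre] using hj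
      -- the head of the dropWhile part is the largest remaining index and fails c
      cases hd : u.dropWhile (popC numbers i) with
      | nil => rw [hd] at hjd; simp at hjd
      | cons h0 t0 =>
        have hh0 : popC numbers i h0 = false := dropWhile_head_false _ u h0 t0 hd
        -- (dropWhile c u).reverse is a prefix of stk, hence sorted with last element h0
        have hsuf : u.dropWhile (popC numbers i) <:+ u := List.dropWhile_suffix (popC numbers i)
        have hpref : (u.dropWhile (popC numbers i)).reverse <+: stk numbers i := by
          have := List.reverse_prefix.2 hsuf
          rwa [hu, List.reverse_reverse] at this
        have hsorted : ((u.dropWhile (popC numbers i)).reverse).Pairwise (· < ·) :=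
          List.Pairwise.sublist hpref.sublist (stk_sorted numbers i)
        have hjle : j ≤ h0 := by
          rw [hd] at hsorted
          have : (t0.reverse ++ [h0]).Pairwise (· < ·) := by
            simpa using hsorted
          rw [hd] at hjd
          rcases (by simpa using hjd : j = h0 ∨ j ∈ t0) with hh | hh
          · omega
          · exact le_of_lt ((List.pairwise_append.1 this).2.2 j (by simp [hh]) h0 (by simp))
        have hjstk : j ∈ stk numbers i := by
          have : j ∈ u := (hsuf.subset) hjd
          simpa [hu] using this
        have hh0stk : h0 ∈ stk numbers i := by
          have : h0 ∈ u := (hsuf.subset) (by rw [hd]; simp)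
          simpa [hu] using this
        have hval : numbers.getD j 0 ≤ numbers.getD h0 0 :=
          stk_mono numbers i j h0 hjstk hh0stk hjle
        have hnotc : ¬ (i = numbers.length ∨ numbers.getD i 0 < numbers.getD h0 0) := by
          intro hcc
          rw [(popC_iff numbers i h0).2 hcc] at hh0
          exact absurd hh0 (by simp)
        push_neg at hnotc
        cases hcj : popC numbers i j
        · rfl
        · exfalso
          rcases (popC_iff numbers i j).1 hcj with hh | hh
          · exact hnotc.1 hh
          · exact absurd (lt_of_lt_of_le hh hval) (not_lt.mpr hnotc.2)
    -- run the step
    rw [List.range_succ, List.foldl_append, List.foldl_cons, List.foldl_nil, hfold]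
    have hrun := pop_run numbers (pvPrefix numbers) i (le_of_lt hi_lt) post pre
      (P.foldl (mstep numbers (pvPrefix numbers)) 0)
      (hsplit ▸ List.prefix_rfl) hpostc
    have hstop := pop_stop numbers (pvPrefix numbers) i pre
      (post.reverse.foldl (mstep numbers (pvPrefix numbers)) (P.foldl (mstep numbers (pvPrefix numbers)) 0))
      hprec
    -- the next stack
    have hkeepi : keepB numbers (i + 1) i = true := by
      rw [keepB_iff]; intro k hk hik; omega
    have hstk_succ : stk numbers (i + 1) = pre ++ [i] := by
      have hcongr : List.filter (fun j => keepB numbers (i + 1) j) (List.range i)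
          = List.filter (fun j => ! popC numbers i j && keepB numbers i j) (List.range i) := by
        apply List.filter_congr
        intro x hx
        rw [keep_succ numbers i x (List.mem_range.1 hx) hi_lt, Bool.and_comm]
      have hmain : List.filter (fun j => keepB numbers (i + 1) j) (List.range i) = pre := by
        rw [hcongr, ← List.filter_filter]
        show List.filter (fun j => ! popC numbers i j) (stk numbers i) = pre
        rw [← hsplit, List.filter_append]
        have hp1 : List.filter (fun j => ! popC numbers i j) pre = pre :=
          List.filter_eq_self.2 (fun x hx => by rw [hprec x hx]; rfl)
        have hp2 : List.filter (fun j => ! popC numbers i j) post = [] :=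
          List.filter_eq_nil_iff.2 (fun x hx => by simp [hpostc x hx])
        rw [hp1, hp2, List.append_nil]
      show List.filter (fun j => keepB numbers (i + 1) j) (List.range (i + 1)) = pre ++ [i]
      rw [List.range_succ, List.filter_append, hmain]
      simp [hkeepi]
    refine ⟨P ++ post.reverse, ?_, ?_⟩
    · -- permutation bookkeeping
      have hnodupP : P.Nodup := hP.nodup_iff.2 ((List.nodup_range).filter _)
      have hnoduppost : post.reverse.Nodup := by
        rw [hpost, List.reverse_reverse]
        exact (List.nodup_reverse.2 (stk_nodup numbers i)).sublist (List.takeWhile_sublist (popC numbers i))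
      have hpostmem : ∀ x, x ∈ post.reverse ↔ (x ∈ stk numbers i ∧ popC numbers i x = true) := by
        intro x
        constructor
        · intro hx
          rw [hpost, List.reverse_reverse] at hx
          refine ⟨?_, List.mem_takeWhile_imp hx⟩
          have : x ∈ u := (List.takeWhile_sublist (popC numbers i)).subset hx
          simpa [hu] using this
        · rintro ⟨hx, hcx⟩
          rw [← hsplit] at hx
          rcases List.mem_append.1 hx with hh | hh
          · rw [hprec x hh] at hcx; exact absurd hcx (by simp)
          · simpa using hh
      apply (List.perm_ext_iff_of_nodup ?_ ?_).2
      · intro x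
        have hr : x ∈ List.range i ++ [i] ↔ x < i + 1 := by
          simp only [List.mem_append, List.mem_range, List.mem_singleton]
          omega
        rw [List.mem_append, List.mem_filter, hr, hPmem, hpostmem]
        constructor
        · rintro (⟨hx1, hx2⟩ | ⟨hx1, hx2⟩)
          · refine ⟨by omega, ?_⟩
            rw [keep_succ numbers i x hx1 hi_lt, hx2]
            rfl
          · obtain ⟨hxi, hxk⟩ := (mem_stk numbers i x).1 hx1
            refine ⟨by omega, ?_⟩
            rw [keep_succ numbers i x hxi hi_lt, hxk, hx2]
            rfl
        · rintro ⟨hx1, hx2⟩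
          have hxi : x < i := by
            rcases Nat.lt_or_ge x i with hh | hh
            · exact hh
            · exfalso
              have hxeq : x = i := by omega
              rw [hxeq, hkeepi] at hx2
              simp at hx2
          rw [keep_succ numbers i x hxi hi_lt] at hx2
          cases hk : keepB numbers i x
          · exact Or.inl ⟨hxi, rfl⟩
          · right
            refine ⟨(mem_stk numbers i x).2 ⟨hxi, hk⟩, ?_⟩
            cases hcx : popC numbers i x
            · rw [hk, hcx] at hx2; simp at hx2
            · rfl
      · rw [List.nodup_append]
        refine ⟨hnodupP, hnoduppost, ?_⟩
        intro a ha b hb hab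
        subst hab
        have h1 := (hPmem a).1 ha
        have h2 := ((hpostmem a).1 hb).1
        obtain ⟨_, hk⟩ := (mem_stk numbers i a).1 h2
        rw [h1.2] at hk
        simp at hk
      · rw [List.filter_append]
        have h3 : List.filter (fun j => ! keepB numbers (i + 1) j) [i] = [] := by
          simp [hkeepi]
        rw [h3, List.append_nil]
        exact List.Nodup.filter _ (List.nodup_range)
    · -- the state equation
      show (i :: (pvPop numbers (pvPrefix numbers) i ((stk numbers i).reverse)
            (P.foldl (mstep numbers (pvPrefix numbers)) 0)).1,
          (pvPop numbers (pvPrefix numbers) i ((stk numbers i).reverse)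
            (P.foldl (mstep numbers (pvPrefix numbers)) 0)).2)
          = ((stk numbers (i + 1)).reverse, (P ++ post.reverse).foldl (mstep numbers (pvPrefix numbers)) 0)
      have heq : pvPop numbers (pvPrefix numbers) i ((stk numbers i).reverse)
          (P.foldl (mstep numbers (pvPrefix numbers)) 0)
          = (pre.reverse, post.reverse.foldl (mstep numbers (pvPrefix numbers))
              (P.foldl (mstep numbers (pvPrefix numbers)) 0)) := by
        rw [← hsplit]
        exact hrun.trans hstop
      rw [heq, hstk_succ, List.foldl_append]
      simp

theorem calculate_spec : Claim_equal_calculate := by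
  unfold Claim_equal_calculate
  intro numbers _
  unfold Spec_calculate
  obtain ⟨P, hP, hfold⟩ := outer_inv numbers numbers.length le_rfl
  unfold calculate
  rw [List.range_succ, List.foldl_append, List.foldl_cons, List.foldl_nil, hfold]
  have hall : ∀ j ∈ stk numbers numbers.length, popC numbers numbers.length j = true :=
    fun j _ => (popC_iff numbers numbers.length j).2 (Or.inl rfl)
  have hrun := pop_run numbers (pvPrefix numbers) numbers.length le_rfl
    (stk numbers numbers.length) []
    (P.foldl (mstep numbers (pvPrefix numbers)) 0)
    (by simpa using (List.prefix_rfl : stk numbers numbers.length <+: stk numbers numbers.length))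
    hall
  simp only [List.nil_append, List.reverse_nil] at hrun
  show (pvPop numbers (pvPrefix numbers) numbers.length ((stk numbers numbers.length).reverse)
      (P.foldl (mstep numbers (pvPrefix numbers)) 0)).2 = calculate_alt numbers
  rw [hrun]
  show ((stk numbers numbers.length).reverse.foldl (mstep numbers (pvPrefix numbers))
      (P.foldl (mstep numbers (pvPrefix numbers)) 0)) = calculate_alt numbers
  rw [← List.foldl_append]
  -- P ++ (stk n).reverse is a permutation of range n
  have hperm : (P ++ (stk numbers numbers.length).reverse).Perm (List.range numbers.length) := by
    refine List.Perm.trans ?_ (List.filter_append_perm (fun j => ! keepB numbers numbers.length j) (List.range numbers.length))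
    refine List.Perm.append hP ?_
    refine List.Perm.trans ((stk numbers numbers.length).reverse_perm) ?_
    rw [stk]
    apply List.Perm.of_eq
    apply List.filter_congr
    intro x _
    simp
  have hcomm : ∀ (b : Int) (x y : Nat),
      mstep numbers (pvPrefix numbers) (mstep numbers (pvPrefix numbers) b x) y
        = mstep numbers (pvPrefix numbers) (mstep numbers (pvPrefix numbers) b y) x := by
    intro b x y
    simp [mstep, max_right_comm]
  rw [hperm.foldl_eq (rcomm := ⟨hcomm⟩)]
  rfl
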